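-- pv_equiv track=rewrite | github.com/jordan-bm/claimsbridge | legacy/processor.py | parse_hl7_record
-- ===== SOURCE A (Python) =====
-- def parse_segment(segment: str) -> dict:
--     """
--     Parse a single HL7 segment into a dict with the segment name and its fields.
--     Example: "MSH|^~\\&|LEGACY_SYS|..." → {"segment": "MSH", "fields": ["^~\\&", "LEGACY_SYS", ...]}
--     """
--     parts = segment.split("|")
--     return {
--         "segment": parts[0],
--         "fields": parts[1:],
--     }
--
-- def parse_hl7_record(raw: str) -> dict:
--     """
--     Parse a full multi-segment HL7 record (as a single string) into a structured dict.
--     """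
--     segments = [line.strip() for line in raw.strip().splitlines() if line.strip()]
--     parsed = {}
--
--     for seg_str in segments:
--         seg = parse_segment(seg_str)
--         name = seg["segment"]
--         fields = seg["fields"]
--
--         if name == "MSH":
--             parsed["message_id"] = fields[8] if len(fields) > 8 else None
--             parsed["sending_facility"] = fields[2] if len(fields) > 2 else None
--             parsed["timestamp"] = fields[6] if len(fields) > 6 else None
--             parsed["payer_id"] = fields[4] if len(fields) > 4 else None
--
--         elif name == "PID":
--             parsed["patient_id"] = fields[2].split("^")[0] if len(fields) > 2 else None
--             name_field = fields[4].split("^") if len(fields) > 4 else []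
--             parsed["patient_last"] = name_field[0] if len(name_field) > 0 else None
--             parsed["patient_first"] = name_field[1] if len(name_field) > 1 else None
--             parsed["dob"] = fields[6] if len(fields) > 6 else None
--             parsed["gender"] = fields[7] if len(fields) > 7 else None
--
--         elif name == "CLM":
--             parsed["claim_amount"] = fields[1] if len(fields) > 1 else None
--             parsed["place_of_service"] = fields[4].split(":")[0] if len(fields) > 4 else None
--
--         elif name == "DG1":
--             diag_field = fields[2].split("^") if len(fields) > 2 else []
--             parsed["diagnosis_code"] = diag_field[0] if diag_field else None
--             parsed["service_date"] = fields[4] if len(fields) > 4 else None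
--
--     return parsed
-- ===== SOURCE B (Python) =====
-- # Table-driven: each segment name maps to (key, field_index, separator, component_index)
-- # rules; one generic extractor replaces the if/elif chain of per-segment assignments.
-- _RULES = {
--     "MSH": [("message_id", 8, None, 0), ("sending_facility", 2, None, 0),
--             ("timestamp", 6, None, 0), ("payer_id", 4, None, 0)],
--     "PID": [("patient_id", 2, "^", 0), ("patient_last", 4, "^", 0),
--             ("patient_first", 4, "^", 1), ("dob", 6, None, 0), ("gender", 7, None, 0)],
--     "CLM": [("claim_amount", 1, None, 0), ("place_of_service", 4, ":", 0)],
--     "DG1": [("diagnosis_code", 2, "^", 0), ("service_date", 4, None, 0)],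
-- }
--
-- def parse_hl7_record(raw: str) -> dict:
--     parsed = {}
--     for line in raw.strip().splitlines():
--         line = line.strip()
--         if not line:
--             continue
--         parts = line.split("|")
--         for key, idx, sep, comp in _RULES.get(parts[0], []):
--             fields = parts[1:]
--             value = None
--             if idx < len(fields):
--                 comps = fields[idx].split(sep) if sep is not None else [fields[idx]]
--                 if comp < len(comps):
--                     value = comps[comp]
--             parsed[key] = value
--     return parsed
-- ===== Notes on version B (the rewrite author's own statement) =====
-- stated objective: simpler
-- what changed: Replaced the per-segment if/elif chain of inline field assignments by a declarative rule table (segment -> list of (key, field index, separator, component index)) driven by one generic extractor loop.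
import Mathlib
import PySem

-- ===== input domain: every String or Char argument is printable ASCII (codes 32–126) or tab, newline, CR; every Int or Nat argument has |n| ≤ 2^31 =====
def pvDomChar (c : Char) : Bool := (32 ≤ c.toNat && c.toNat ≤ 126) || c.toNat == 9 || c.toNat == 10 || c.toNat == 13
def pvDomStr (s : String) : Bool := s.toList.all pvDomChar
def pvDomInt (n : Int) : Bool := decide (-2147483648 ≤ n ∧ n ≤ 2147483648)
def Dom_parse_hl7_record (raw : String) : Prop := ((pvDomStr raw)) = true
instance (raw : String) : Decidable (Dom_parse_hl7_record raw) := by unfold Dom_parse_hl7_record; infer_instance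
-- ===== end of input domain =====

-- B replaces A's if/elif chain of per-segment assignments by a rule table and one
-- generic field extractor (objective: simpler, same cost; equivalence is about the return value).

-- ===== PORT A =====
-- s.split(sep) for a nonempty separator (split? is none only for sep = "", and every
-- separator used below is a nonempty literal, so getD [] is exact)
def pvSplit (s sep : String) : List String := (PySem.Str.split? s sep).getD []

-- parse_segment returns {"segment": parts[0], "fields": parts[1:]}, ported as a pair;
-- parts[0] always exists (split of any string is a nonempty list), so headD "" is exact
def pvParseSegment (segment : String) : String × List String :=
  let parts := pvSplit segment "|"
  (parts.headD "", parts.drop 1)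

-- the body of A's for-loop: one segment string updating the accumulated dict
def pvStepA (d : PySem.Dict String (Option String)) (seg_str : String) :
    PySem.Dict String (Option String) :=
  let seg := pvParseSegment seg_str
  let name := seg.1
  let fields := seg.2
  if name = "MSH" then
    let d := d.insert "message_id" (if fields.length > 8 then some (fields.getD 8 "") else none)
    let d := d.insert "sending_facility" (if fields.length > 2 then some (fields.getD 2 "") else none)
    let d := d.insert "timestamp" (if fields.length > 6 then some (fields.getD 6 "") else none)
    d.insert "payer_id" (if fields.length > 4 then some (fields.getD 4 "") else none)
  else if name = "PID" then
    -- fields[2].split("^")[0]: the split result is always nonempty, so headD "" is exact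
    let d := d.insert "patient_id"
      (if fields.length > 2 then some ((pvSplit (fields.getD 2 "") "^").headD "") else none)
    let name_field := if fields.length > 4 then pvSplit (fields.getD 4 "") "^" else []
    let d := d.insert "patient_last" (if name_field.length > 0 then some (name_field.getD 0 "") else none)
    let d := d.insert "patient_first" (if name_field.length > 1 then some (name_field.getD 1 "") else none)
    let d := d.insert "dob" (if fields.length > 6 then some (fields.getD 6 "") else none)
    d.insert "gender" (if fields.length > 7 then some (fields.getD 7 "") else none)
  else if name = "CLM" then
    let d := d.insert "claim_amount" (if fields.length > 1 then some (fields.getD 1 "") else none)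
    d.insert "place_of_service"
      (if fields.length > 4 then some ((pvSplit (fields.getD 4 "") ":").headD "") else none)
  else if name = "DG1" then
    let diag_field := if fields.length > 2 then pvSplit (fields.getD 2 "") "^" else []
    -- "if diag_field" = Python list truthiness = nonempty
    let d := d.insert "diagnosis_code" (if diag_field.length > 0 then some (diag_field.getD 0 "") else none)
    d.insert "service_date" (if fields.length > 4 then some (fields.getD 4 "") else none)
  else d

def parse_hl7_record (raw : String) : List (String × Option String) :=
  let segments := (((PySem.Str.splitlines (PySem.Str.strip raw)).map PySem.Str.strip).filter (· ≠ ""))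
  (segments.foldl pvStepA PySem.Dict.empty).items

-- ===== PORT B =====
-- a rule is (output key, field index, optional separator, component index);
-- field/component indices are nonnegative literal table constants, hence Nat
def pvRules : PySem.Dict String (List (String × Nat × Option String × Nat)) :=
  PySem.Dict.ofList
    [ ("MSH", [("message_id", 8, none, 0), ("sending_facility", 2, none, 0),
               ("timestamp", 6, none, 0), ("payer_id", 4, none, 0)]),
      ("PID", [("patient_id", 2, some "^", 0), ("patient_last", 4, some "^", 0),
               ("patient_first", 4, some "^", 1), ("dob", 6, none, 0), ("gender", 7, none, 0)]),
      ("CLM", [("claim_amount", 1, none, 0), ("place_of_service", 4, some ":", 0)]),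
      ("DG1", [("diagnosis_code", 2, some "^", 0), ("service_date", 4, none, 0)]) ]

def pvApplyRule (parts : List String) (d : PySem.Dict String (Option String))
    (r : String × Nat × Option String × Nat) : PySem.Dict String (Option String) :=
  let fields := parts.drop 1
  let value : Option String :=
    if r.2.1 < fields.length then
      let comps := match r.2.2.1 with
        | some sep => pvSplit (fields.getD r.2.1 "") sep
        | none => [fields.getD r.2.1 ""]
      if r.2.2.2 < comps.length then some (comps.getD r.2.2.2 "") else none
    else none
  d.insert r.1 value

-- the body of B's for-loop over raw lines (strip, skip empties, apply the rules)
def pvStepB (d : PySem.Dict String (Option String)) (line0 : String) :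
    PySem.Dict String (Option String) :=
  let line := PySem.Str.strip line0
  if line = "" then d
  else
    let parts := pvSplit line "|"
    (pvRules.getD (parts.headD "") []).foldl (pvApplyRule parts) d

def parse_hl7_record_alt (raw : String) : List (String × Option String) :=
  ((PySem.Str.splitlines (PySem.Str.strip raw)).foldl pvStepB PySem.Dict.empty).items

-- ===== PRECONDITION & SPEC =====
def Spec_parse_hl7_record (raw : String) (out : List (String × Option String)) : Prop := out = parse_hl7_record_alt raw
instance (raw : String) (out : List (String × Option String)) : Decidable (Spec_parse_hl7_record raw out) := by unfold Spec_parse_hl7_record; infer_instance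

-- ===== CLAIM (what is proved, stated in full; the proofs are below) =====
def Claim_equal_parse_hl7_record : Prop := ∀ (raw : String), Dom_parse_hl7_record raw → Spec_parse_hl7_record raw (parse_hl7_record raw)

-- ===== LEMMAS AND PROOFS =====

-- splitting never yields the empty list (every exit of the splitter conses onto acc)
lemma pvGo_ne_nil (sep : List Char) :
    ∀ (fuel : Nat) (l cur : List Char) (acc : List (List Char)),
      PySem.Chars.splitOn.go sep fuel l cur acc ≠ [] := by
  intro fuel
  induction fuel with
  | zero => intro l cur acc; simp [PySem.Chars.splitOn.go]
  | succ n ih =>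
    intro l cur acc
    cases l with
    | nil => simp [PySem.Chars.splitOn.go]
    | cons c rest =>
      rw [PySem.Chars.splitOn.go]
      split
      · exact ih _ _ _
      · exact ih _ _ _

lemma pvSplit_ne_nil (s sep : String) (hsep : sep ≠ "") : pvSplit s sep ≠ [] := by
  have h : sep.toList ≠ [] := by
    intro hn; apply hsep
    have := congrArg String.ofList hn; simpa using this
  simp [pvSplit, PySem.Str.split?, PySem.Chars.split?, List.isEmpty_iff, h,
    PySem.Chars.splitOn]
  exact pvGo_ne_nil _ _ _ _ _

-- B's guarded component extraction collapses to A's headD on a nonempty split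
lemma extract_head (comps : List String) (h : comps ≠ []) :
    (if 0 < comps.length then some (comps.getD 0 "") else none) = some (comps.headD "") := by
  cases comps with
  | nil => exact absurd rfl h
  | cons x xs => rfl

-- the rule table as an explicit association list
lemma pvRules_eq : pvRules = PySem.Dict.mk
    [ ("MSH", [("message_id", 8, none, 0), ("sending_facility", 2, none, 0),
               ("timestamp", 6, none, 0), ("payer_id", 4, none, 0)]),
      ("PID", [("patient_id", 2, some "^", 0), ("patient_last", 4, some "^", 0),
               ("patient_first", 4, some "^", 1), ("dob", 6, none, 0), ("gender", 7, none, 0)]),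
      ("CLM", [("claim_amount", 1, none, 0), ("place_of_service", 4, some ":", 0)]),
      ("DG1", [("diagnosis_code", 2, some "^", 0), ("service_date", 4, none, 0)]) ] := by
  decide

-- guarded extraction shapes: B's generic rule vs A's inline expressions
lemma guard_split_head (b : Prop) [Decidable b] (s sep : String) (hsep : sep ≠ "") :
    (if b then (if 0 < (pvSplit s sep).length then some ((pvSplit s sep).getD 0 "") else none) else none)
      = if b then some ((pvSplit s sep).headD "") else none := by
  by_cases hb : b
  · simp only [if_pos hb]; exact extract_head _ (pvSplit_ne_nil s sep hsep)
  · simp only [if_neg hb]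

lemma guard_comp (b : Prop) [Decidable b] (k : Nat) (comps : List String) :
    (if b then (if k < comps.length then some (comps.getD k "") else none) else none)
      = if (if b then comps else []).length > k then some ((if b then comps else []).getD k "") else none := by
  split_ifs <;> simp_all

lemma guard_hat (b : Prop) [Decidable b] (s : String) :
    (if b then (if 0 < (pvSplit s "^").length then some ((pvSplit s "^").getD 0 "") else none) else none)
      = if b then some ((pvSplit s "^").headD "") else none :=
  guard_split_head b s "^" (by decide)

lemma guard_colon (b : Prop) [Decidable b] (s : String) :
    (if b then (if 0 < (pvSplit s ":").length then some ((pvSplit s ":").getD 0 "") else none) else none)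
      = if b then some ((pvSplit s ":").headD "") else none :=
  guard_split_head b s ":" (by decide)

-- the table lookup spelled out as A's if/elif dispatch (the elif order is the key order)
set_option maxRecDepth 8192 in
lemma rules_lookup (n : String) :
    pvRules.getD n []
      = if n = "MSH" then [("message_id", 8, none, 0), ("sending_facility", 2, none, 0),
                           ("timestamp", 6, none, 0), ("payer_id", 4, none, 0)]
        else if n = "PID" then [("patient_id", 2, some "^", 0), ("patient_last", 4, some "^", 0),
                                ("patient_first", 4, some "^", 1), ("dob", 6, none, 0), ("gender", 7, none, 0)]
        else if n = "CLM" then [("claim_amount", 1, none, 0), ("place_of_service", 4, some ":", 0)]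
        else if n = "DG1" then [("diagnosis_code", 2, some "^", 0), ("service_date", 4, none, 0)]
        else [] := by
  by_cases h1 : n = "MSH"
  · subst h1; decide
  by_cases h2 : n = "PID"
  · subst h2; decide
  by_cases h3 : n = "CLM"
  · subst h3; decide
  by_cases h4 : n = "DG1"
  · subst h4; decide
  simp [pvRules_eq, PySem.Dict.getD, PySem.Dict.get?,
    Ne.symm h1, Ne.symm h2, Ne.symm h3, Ne.symm h4, h1, h2, h3, h4]

-- for one (already stripped, nonempty) line both loop bodies update the dict identically
lemma step_eq (d : PySem.Dict String (Option String)) (t : String)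
    (ht : ¬ PySem.Str.strip t = "") : pvStepB d t = pvStepA d (PySem.Str.strip t) := by
  unfold pvStepB pvStepA pvParseSegment
  rw [if_neg ht]
  generalize pvSplit (PySem.Str.strip t) "|" = ps
  simp only []
  rw [rules_lookup]
  by_cases h1 : ps.headD "" = "MSH"
  · simp only [if_pos h1]
    rfl
  by_cases h2 : ps.headD "" = "PID"
  · simp only [if_neg h1, if_pos h2, List.foldl_cons, List.foldl_nil, pvApplyRule]
    simp only [← guard_comp]
    simp only [guard_hat]
    rfl
  by_cases h3 : ps.headD "" = "CLM"
  · simp only [if_neg h1, if_neg h2, if_pos h3, List.foldl_cons, List.foldl_nil, pvApplyRule]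
    simp only [guard_colon]
    rfl
  by_cases h4 : ps.headD "" = "DG1"
  · simp only [if_neg h1, if_neg h2, if_neg h3, if_pos h4, List.foldl_cons, List.foldl_nil,
      pvApplyRule]
    simp only [← guard_comp]
    rfl
  simp only [if_neg h1, if_neg h2, if_neg h3, if_neg h4, List.foldl_nil]

-- A folds over the strip-mapped, nonempty-filtered lines; B folds over the raw lines skipping empties
lemma foldl_eq (lines : List String) (d : PySem.Dict String (Option String)) :
    ((lines.map PySem.Str.strip).filter (· ≠ "")).foldl pvStepA d = lines.foldl pvStepB d := by
  induction lines generalizing d with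
  | nil => rfl
  | cons l ls ih =>
    by_cases h : PySem.Str.strip l = ""
    · simpa [h, pvStepB, List.filter_cons] using ih d
    · have hc : (decide (PySem.Str.strip l ≠ "")) = true := by simp [h]
      simp only [List.map_cons, List.filter_cons, hc, if_true, List.foldl_cons]
      rw [step_eq d l h, ih]

-- ===== VERDICT (by name: the statement is the Claim_ definition above) =====
theorem parse_hl7_record_spec : Claim_equal_parse_hl7_record := by
  intro raw _
  show (((((PySem.Str.splitlines (PySem.Str.strip raw)).map PySem.Str.strip).filter (· ≠ "")).foldl pvStepA PySem.Dict.empty)).items = _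
  rw [foldl_eq]
  rfl
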